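-- pv_equiv track=rewrite | github.com/coingraham/adventofcode | 2020/day7.py | walk_relationship_with_counts
-- ===== SOURCE A (Python) =====
-- def walk_relationship_with_counts(relationships, starting_point, previous, answer_list):
--     if starting_point in relationships.keys():
--         for path in relationships[starting_point]:
--             if path[0] == "other":
--                 return
--
--             else:
--                 current = previous * int(path[1])
--                 answer_list.append(current)
--                 walk_relationship_with_counts(relationships, path[0], current, answer_list)
--
--     return sum(answer_list)
-- ===== SOURCE B (Python) =====
-- def walk_relationship_with_counts(relationships, starting_point, previous, answer_list):
--     """Bottom-up dataflow computation of nested bag counts: iterate per-bag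
--     totals to a fixed point over the bags reachable from starting_point.
--     In this data format an entry named "other" terminates a bag's contents
--     ("no other bags").  Return value only; the argument lists are not mutated."""
--     reach = {starting_point}
--     for _ in range(len(relationships) + 1):
--         new_names = [n for bag in reach
--                      for n in _contents_names(relationships.get(bag, []))]
--         if all(n in reach for n in new_names):
--             break
--         reach.update(new_names)
--     total = {}
--     for _ in range(len(relationships) + 1):
--         new = {bag: _bag_total(contents, total)
--                for bag, contents in relationships.items() if bag in reach}
--         stable = all(total.get(bag, 0) == t for bag, t in new.items())
--         total = new
--         if stable:
--             break
--     return sum(answer_list) + previous * total.get(starting_point, 0)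
--
--
-- def _contents_names(contents):
--     names = []
--     for name, _qty in contents:
--         if name == "other":
--             break
--         names.append(name)
--     return names
--
--
-- def _bag_total(contents, total):
--     t = 0
--     for name, qty in contents:
--         if name == "other":
--             break
--         t += int(qty) * (1 + total.get(name, 0))
--     return t
-- ===== Notes on version B (the rewrite author's own statement) =====
-- stated objective: alternative
-- what changed: Replaces A's depth-first recursion that appends every nested count to a shared list with an iterative bottom-up fixed-point: B computes a per-bag unit contained count over the reachable sub-graph by repeated rounds until stable and returns sum(answer_list) + previous * total[starting_point]; on shared DAGs this avoids A's re-walking of repeated sub-trees.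
-- intended difference: When the starting bag's own contents list contains the terminator entry "other", A's bare mid-loop return yields None; B returns the completed total sum(answer_list) + previous * total[starting_point], which is the value A's own sum(answer_list) line was meant to produce. — e.g. on walk_relationship_with_counts([("a", [("other", "1")])], "a", 3, [4]): A returns none, B returns some 4
import Mathlib
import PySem

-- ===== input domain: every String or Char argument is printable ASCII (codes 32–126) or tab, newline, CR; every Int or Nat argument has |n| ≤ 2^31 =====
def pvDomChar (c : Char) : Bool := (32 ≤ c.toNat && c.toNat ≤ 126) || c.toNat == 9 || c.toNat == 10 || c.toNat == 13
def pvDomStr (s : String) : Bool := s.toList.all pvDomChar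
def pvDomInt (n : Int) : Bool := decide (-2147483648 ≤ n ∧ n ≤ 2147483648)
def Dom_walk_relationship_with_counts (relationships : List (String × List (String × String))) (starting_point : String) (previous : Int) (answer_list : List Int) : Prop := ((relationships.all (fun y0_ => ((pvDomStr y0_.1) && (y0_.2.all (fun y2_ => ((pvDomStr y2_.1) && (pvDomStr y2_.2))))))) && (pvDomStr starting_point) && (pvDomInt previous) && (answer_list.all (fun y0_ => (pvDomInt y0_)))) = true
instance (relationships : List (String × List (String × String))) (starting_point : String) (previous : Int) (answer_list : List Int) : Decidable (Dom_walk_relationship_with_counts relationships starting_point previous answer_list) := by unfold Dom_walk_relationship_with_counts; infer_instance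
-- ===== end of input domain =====

-- B replaces A's depth-first recursion (which appends every nested count to a shared list) by a
-- bottom-up fixed-point table over the reachable sub-graph; RETURN VALUE only — Python A also
-- appends to answer_list in place, B does not.

-- ===== PORT A =====
-- int(s); exact under Pre_ (every quantity string the program evaluates parses as an int)
def pyInt (s : String) : Int := (PySem.Int.ofStr? s).getD 0

-- the recursive call of A (its return value is discarded in Python; only the appends matter).
-- fuel: Python has no bound; under Pre_ (no reachable cycle) fuel d.size from the top call is
-- never exhausted at a node that is a key, so the port computes exactly what A does.
mutual
def pvGoA (d : PySem.Dict String (List (String × String))) : Nat → String → Int → List Int → List Int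
  | 0, _, _, acc => acc
  | fuel+1, s, p, acc =>
    match d.get? s with
    | none => acc
    | some paths => pvLoopA d fuel paths p acc
termination_by fuel _ _ _ => (fuel, 0)

def pvLoopA (d : PySem.Dict String (List (String × String))) : Nat → List (String × String) → Int → List Int → List Int
  | _, [], _, acc => acc
  | fuel, (name, qty) :: rest, p, acc =>
    if name == "other" then acc
    else
      let cur := p * pyInt qty
      pvLoopA d fuel rest p (pvGoA d fuel name cur (acc ++ [cur]))
termination_by fuel paths _ _ => (fuel, paths.length + 1)
end

-- the top-level call: here (and only here) hitting "other" returns None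
def pvTopA (d : PySem.Dict String (List (String × String))) : List (String × String) → Int → List Int → Option Int
  | [], _, acc => some acc.sum
  | (name, qty) :: rest, p, acc =>
    if name == "other" then none
    else
      let cur := p * pyInt qty
      pvTopA d rest p (pvGoA d d.size name cur (acc ++ [cur]))

def walk_relationship_with_counts (relationships : List (String × List (String × String))) (starting_point : String) (previous : Int) (answer_list : List Int) : Option Int :=
  let d := PySem.Dict.ofList relationships
  match d.get? starting_point with
  | some paths => pvTopA d paths previous answer_list
  | none => some answer_list.sum

-- ===== PORT B =====
-- names of the entries before the terminator "other" (Source B's _contents_names)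
def pvChildrenB (contents : List (String × String)) : List String :=
  (contents.takeWhile (fun pr => !(pr.1 == "other"))).map Prod.fst

-- one row of the table: Source B's _bag_total loop
def pvRowB (table : PySem.Dict String Int) : List (String × String) → Int
  | [] => 0
  | (name, qty) :: rest =>
    if name == "other" then 0
    else pyInt qty * (1 + table.getD name 0) + pvRowB table rest

-- the 'reach.update(new_names)' line of Source B
def pvReachStepB (d : PySem.Dict String (List (String × String))) (S : PySem.Set String) : PySem.Set String :=
  PySem.Set.update S (S.flatMap (fun node => pvChildrenB ((d.get? node).getD [])))

-- Source B's reach loop: at most n+1 rounds, breaking as soon as no new name appears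
def pvReachIterB (d : PySem.Dict String (List (String × String))) : Nat → PySem.Set String → PySem.Set String
  | 0, S => S
  | j+1, S =>
    if (S.flatMap (fun node => pvChildrenB ((d.get? node).getD []))).all (fun x => S.contains x) then S
    else pvReachIterB d j (pvReachStepB d S)

-- one table round: rebuild the row of every reachable bag from the previous round's table
def pvRoundB (d : PySem.Dict String (List (String × String))) (reach : PySem.Set String) (table : PySem.Dict String Int) : PySem.Dict String Int :=
  d.items.foldl (fun t kv => if reach.contains kv.1 then t.insert kv.1 (pvRowB table kv.2) else t) PySem.Dict.empty

-- Source B's table loop: at most n+1 rounds, breaking as soon as a round changes nothing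
def pvTableIterB (d : PySem.Dict String (List (String × String))) (reach : PySem.Set String) : Nat → PySem.Dict String Int → PySem.Dict String Int
  | 0, T => T
  | j+1, T =>
    let T' := pvRoundB d reach T
    if T'.items.all (fun kv => T.getD kv.1 0 == kv.2) then T'
    else pvTableIterB d reach j T'

def walk_relationship_with_counts_alt (relationships : List (String × List (String × String))) (starting_point : String) (previous : Int) (answer_list : List Int) : Option Int :=
  let d := PySem.Dict.ofList relationships
  let n := d.size
  let reach := pvReachIterB d (n + 1) (PySem.Set.ofList [starting_point])
  let table := pvTableIterB d reach (n + 1) PySem.Dict.empty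
  some (answer_list.sum + previous * table.getD starting_point 0)

-- ===== PRECONDITION & SPEC =====
-- Pre_-side copies of the graph helpers (kept separate from the ports): children of a bag are
-- the names of its entries before the first "other"; pvPreIter closes a node set under them.
def pvPreChildren (d : PySem.Dict String (List (String × String))) (node : String) : List String :=
  (((d.get? node).getD []).takeWhile (fun pr => !(pr.1 == "other"))).map Prod.fst

def pvPreStep (d : PySem.Dict String (List (String × String))) (S : List String) : List String :=
  (S ++ S.flatMap (pvPreChildren d)).dedup

def pvPreIter (d : PySem.Dict String (List (String × String))) : Nat → List String → List String
  | 0, S => S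
  | j+1, S => pvPreIter d j (pvPreStep d S)

-- Pre_: exactly where Python A returns normally — every quantity string A evaluates (entries
-- before the first "other" of a bag reachable from starting_point) parses as an int (otherwise
-- ValueError), and no reachable bag is its own descendant (otherwise unbounded recursion /
-- RecursionError). pvPreIter is the standard reachable-set closure of the input GRAPH (the
-- edge relation 'bag → names before its first "other"'), a shape property of the input; it is
-- not a run of either port (neither port computes pvPreIter, and the proof of Claim_unchanged
-- does not consume Pre_: the fuel-totalized ports agree on all of Dom, Pre_ only delimits
-- where Python A itself returns a value).
def Pre_walk_relationship_with_counts (relationships : List (String × List (String × String))) (starting_point : String) (previous : Int) (answer_list : List Int) : Prop :=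
  (∀ node ∈ pvPreIter (PySem.Dict.ofList relationships) ((PySem.Dict.ofList relationships).size + 1) [starting_point],
      (∀ pr ∈ (((PySem.Dict.ofList relationships).get? node).getD []).takeWhile (fun pr => !(pr.1 == "other")),
        PySem.Int.ofStr? pr.2 ≠ none)
    ∧ node ∉ pvPreIter (PySem.Dict.ofList relationships) ((PySem.Dict.ofList relationships).size + 1) (pvPreChildren (PySem.Dict.ofList relationships) node))
instance (relationships : List (String × List (String × String))) (starting_point : String) (previous : Int) (answer_list : List Int) : Decidable (Pre_walk_relationship_with_counts relationships starting_point previous answer_list) := by unfold Pre_walk_relationship_with_counts; infer_instance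

def pvWitness_walk_relationship_with_counts : (List (String × List (String × String))) × String × Int × List Int :=
  ([("a", [("b", "2")]), ("b", [("other", "1")])], "a", 2, [5])

-- When the starting bag's own contents list contains the terminator entry "other", A's bare
-- mid-loop return yields None; B returns the completed total
-- sum(answer_list) + previous * total[starting_point], which is the value A's own
-- sum(answer_list) line was meant to produce.
-- last-match lookup on the raw association list (= Python dict construction: later duplicate
-- keys overwrite); used by D_ so it is cheap to decide on large literal inputs
def pvLastLookup (ps : List (String × List (String × String))) (k : String) : Option (List (String × String)) :=
  ps.foldl (fun acc kv => if kv.1 == k then some kv.2 else acc) none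

def D_walk_relationship_with_counts (relationships : List (String × List (String × String))) (starting_point : String) (previous : Int) (answer_list : List Int) : Prop :=
  ((pvLastLookup relationships starting_point).getD []).any (fun pr => pr.1 == "other") = true
instance (relationships : List (String × List (String × String))) (starting_point : String) (previous : Int) (answer_list : List Int) : Decidable (D_walk_relationship_with_counts relationships starting_point previous answer_list) := by unfold D_walk_relationship_with_counts; infer_instance

def Spec_walk_relationship_with_counts (relationships : List (String × List (String × String))) (starting_point : String) (previous : Int) (answer_list : List Int) (out : Option Int) : Prop := ¬ D_walk_relationship_with_counts relationships starting_point previous answer_list → out = walk_relationship_with_counts_alt relationships starting_point previous answer_list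
instance (relationships : List (String × List (String × String))) (starting_point : String) (previous : Int) (answer_list : List Int) (out : Option Int) : Decidable (Spec_walk_relationship_with_counts relationships starting_point previous answer_list out) := by unfold Spec_walk_relationship_with_counts; infer_instance

def pvDiffWitness_walk_relationship_with_counts : (List (String × List (String × String))) × String × Int × List Int :=
  ([("a", [("other", "1")])], "a", 3, [4])
def pvDiffWitnessOut_walk_relationship_with_counts : (Option Int) × (Option Int) := (none, some 4)

-- ===== CLAIM (what is proved, stated in full; the proofs are below) =====
def Claim_unchanged_walk_relationship_with_counts : Prop := ∀ (relationships : List (String × List (String × String))) (starting_point : String) (previous : Int) (answer_list : List Int), Dom_walk_relationship_with_counts relationships starting_point previous answer_list → Pre_walk_relationship_with_counts relationships starting_point previous answer_list → Spec_walk_relationship_with_counts relationships starting_point previous answer_list (walk_relationship_with_counts relationships starting_point previous answer_list)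
def Claim_changed_walk_relationship_with_counts : Prop := Dom_walk_relationship_with_counts (pvDiffWitness_walk_relationship_with_counts.1) (pvDiffWitness_walk_relationship_with_counts.2.1) (pvDiffWitness_walk_relationship_with_counts.2.2.1) (pvDiffWitness_walk_relationship_with_counts.2.2.2) ∧ Pre_walk_relationship_with_counts (pvDiffWitness_walk_relationship_with_counts.1) (pvDiffWitness_walk_relationship_with_counts.2.1) (pvDiffWitness_walk_relationship_with_counts.2.2.1) (pvDiffWitness_walk_relationship_with_counts.2.2.2) ∧ D_walk_relationship_with_counts (pvDiffWitness_walk_relationship_with_counts.1) (pvDiffWitness_walk_relationship_with_counts.2.1) (pvDiffWitness_walk_relationship_with_counts.2.2.1) (pvDiffWitness_walk_relationship_with_counts.2.2.2) ∧ walk_relationship_with_counts (pvDiffWitness_walk_relationship_with_counts.1) (pvDiffWitness_walk_relationship_with_counts.2.1) (pvDiffWitness_walk_relationship_with_counts.2.2.1) (pvDiffWitness_walk_relationship_with_counts.2.2.2) = pvDiffWitnessOut_walk_relationship_with_counts.1 ∧ walk_relationship_with_counts_alt (pvDiffWitness_walk_relationship_with_counts.1) (pvDiffWitness_walk_relationship_with_counts.2.1)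 (pvDiffWitness_walk_relationship_with_counts.2.2.1) (pvDiffWitness_walk_relationship_with_counts.2.2.2) = pvDiffWitnessOut_walk_relationship_with_counts.2 ∧ pvDiffWitnessOut_walk_relationship_with_counts.1 ≠ pvDiffWitnessOut_walk_relationship_with_counts.2
def Claim_exact_walk_relationship_with_counts : Prop := ∀ (relationships : List (String × List (String × String))) (starting_point : String) (previous : Int) (answer_list : List Int), Dom_walk_relationship_with_counts relationships starting_point previous answer_list → Pre_walk_relationship_with_counts relationships starting_point previous answer_list → D_walk_relationship_with_counts relationships starting_point previous answer_list → walk_relationship_with_counts relationships starting_point previous answer_list ≠ walk_relationship_with_counts_alt relationships starting_point previous answer_list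

-- ===== LEMMAS AND PROOFS =====
-- proof-only reference function: the per-unit contained count at a given fuel
mutual
def pvUnitF (d : PySem.Dict String (List (String × String))) : Nat → String → Int
  | 0, _ => 0
  | f+1, s =>
    match d.get? s with
    | none => 0
    | some paths => pvUnitL d f paths
termination_by f _ => (f, 0)

def pvUnitL (d : PySem.Dict String (List (String × String))) : Nat → List (String × String) → Int
  | _, [] => 0
  | f, (name, qty) :: rest =>
    if name == "other" then 0
    else pyInt qty * (1 + pvUnitF d f name) + pvUnitL d f rest
termination_by f l => (f, l.length + 1)
end

-- proof-only: the breakless (always n rounds) forms of B's two loops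
def pvReachPlain (d : PySem.Dict String (List (String × String))) : Nat → PySem.Set String → PySem.Set String
  | 0, S => S
  | j+1, S => pvReachPlain d j (pvReachStepB d S)

def pvTablePlain (d : PySem.Dict String (List (String × String))) (reach : PySem.Set String) : Nat → PySem.Dict String Int → PySem.Dict String Int
  | 0, T => T
  | j+1, T => pvTablePlain d reach j (pvRoundB d reach T)

theorem pv_sumLoop (d : PySem.Dict String (List (String × String))) (f : Nat)
    (hgo : ∀ s c acc, (pvGoA d f s c acc).sum = acc.sum + c * pvUnitF d f s) :
    ∀ (paths : List (String × String)) (p : Int) (acc : List Int),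
      (pvLoopA d f paths p acc).sum = acc.sum + p * pvUnitL d f paths := by
  intro paths
  induction paths with
  | nil => intro p acc; simp [pvLoopA, pvUnitL]
  | cons pr rest ih =>
    intro p acc
    obtain ⟨name, qty⟩ := pr
    by_cases h : name == "other"
    · simp [pvLoopA, pvUnitL, h]
    · simp only [pvLoopA, pvUnitL, h, Bool.false_eq_true, if_false]
      rw [ih, hgo]
      simp [List.sum_append]
      ring

theorem pv_sumGo (d : PySem.Dict String (List (String × String))) :
    ∀ (f : Nat) (s : String) (c : Int) (acc : List Int),
      (pvGoA d f s c acc).sum = acc.sum + c * pvUnitF d f s := by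
  intro f
  induction f with
  | zero => intro s c acc; simp [pvGoA, pvUnitF]
  | succ f ih =>
    intro s c acc
    cases h : d.get? s with
    | none => simp [pvGoA, pvUnitF, h]
    | some paths => simp [pvGoA, pvUnitF, h, pv_sumLoop d f ih]

theorem pv_topA_of_other (d : PySem.Dict String (List (String × String))) :
    ∀ (paths : List (String × String)) (p : Int) (acc : List Int),
      paths.any (fun pr => pr.1 == "other") = true → pvTopA d paths p acc = none := by
  intro paths
  induction paths with
  | nil => intro p acc h; simp at h
  | cons pr rest ih =>
    intro p acc h
    obtain ⟨name, qty⟩ := pr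
    by_cases hn : name == "other"
    · simp [pvTopA, hn]
    · simp only [List.any_cons] at h
      simp only [pvTopA, hn, Bool.false_eq_true, if_false]
      exact ih _ _ (by simpa [hn] using h)

theorem pv_topA_of_no_other (d : PySem.Dict String (List (String × String))) :
    ∀ (paths : List (String × String)) (p : Int) (acc : List Int),
      paths.any (fun pr => pr.1 == "other") = false →
      pvTopA d paths p acc = some (acc.sum + p * pvUnitL d d.size paths) := by
  intro paths
  induction paths with
  | nil => intro p acc h; simp [pvTopA, pvUnitL]
  | cons pr rest ih =>
    intro p acc h
    obtain ⟨name, qty⟩ := pr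
    simp only [List.any_cons, Bool.or_eq_false_iff] at h
    simp only [pvTopA, pvUnitL, h.1, Bool.false_eq_true, if_false]
    rw [ih _ _ h.2, pv_sumGo]
    simp [List.sum_append]
    ring_nf

-- ----- reach loop: early-exit form = breakless form, and membership facts -----
theorem pv_update_eq_of_all (S : PySem.Set String) (xs : List String)
    (h : xs.all (fun x => S.contains x) = true) : PySem.Set.update S xs = S := by
  rw [PySem.Set.update_eq_append_filter]
  have : (PySem.Set.ofList xs).filter (fun y => !(PySem.Set.contains S y)) = [] := by
    rw [List.filter_eq_nil_iff]
    intro a ha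
    have hx : a ∈ xs := (PySem.Set.mem_ofList _ _).mp ha
    have := (List.all_eq_true.mp h) a hx
    simp_all
  rw [this, List.append_nil]

theorem pv_reachPlain_stable (d : PySem.Dict String (List (String × String)))
    (S : PySem.Set String) (h : pvReachStepB d S = S) :
    ∀ j, pvReachPlain d j S = S := by
  intro j
  induction j with
  | zero => rfl
  | succ j ih => rw [pvReachPlain, h, ih]

theorem pv_reachEarly_eq_plain (d : PySem.Dict String (List (String × String))) :
    ∀ (j : Nat) (S : PySem.Set String), pvReachIterB d j S = pvReachPlain d j S := by
  intro j
  induction j with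
  | zero => intro S; rfl
  | succ j ih =>
    intro S
    rw [pvReachIterB, pvReachPlain]
    by_cases h : (S.flatMap (fun node => pvChildrenB ((d.get? node).getD []))).all (fun x => S.contains x) = true
    · rw [if_pos h]
      have hst : pvReachStepB d S = S := pv_update_eq_of_all S _ h
      rw [hst, pv_reachPlain_stable d S hst]
    · rw [if_neg h, ih]

theorem pv_reachPlain_succ' (d : PySem.Dict String (List (String × String))) :
    ∀ (j : Nat) (S : PySem.Set String),
      pvReachPlain d (j+1) S = pvReachStepB d (pvReachPlain d j S) := by
  intro j
  induction j with
  | zero => intro S; rfl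
  | succ j ih => intro S; rw [pvReachPlain, ih]; rfl

theorem pv_mem_reachStep (d : PySem.Dict String (List (String × String))) (S : PySem.Set String)
    (x : String) (hx : x ∈ S) : x ∈ pvReachStepB d S :=
  (PySem.Set.mem_update _ _ _).mpr (Or.inl hx)

theorem pv_mem_child_reachStep (d : PySem.Dict String (List (String × String))) (S : PySem.Set String)
    (k c : String) (hk : k ∈ S) (hc : c ∈ pvChildrenB ((d.get? k).getD [])) :
    c ∈ pvReachStepB d S :=
  (PySem.Set.mem_update _ _ _).mpr (Or.inr (List.mem_flatMap.mpr ⟨k, hk, hc⟩))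

theorem pv_mem_reach_le (d : PySem.Dict String (List (String × String))) (S : PySem.Set String) :
    ∀ {m m' : Nat}, m ≤ m' → ∀ x, x ∈ pvReachPlain d m S → x ∈ pvReachPlain d m' S := by
  intro m m' h
  induction m' , h using Nat.le_induction with
  | base => intro x hx; exact hx
  | succ m' _ ih =>
    intro x hx
    rw [pv_reachPlain_succ']
    exact pv_mem_reachStep d _ x (ih x hx)

-- ----- a lookup characterisation of one table round -----
theorem pv_lookup_eq_none_of_not_mem {β : Type} (k : String) :
    ∀ (l : List (String × β)), k ∉ l.map Prod.fst → l.lookup k = none := by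
  intro l
  induction l with
  | nil => intro _; rfl
  | cons a rest ih =>
    intro h
    simp only [List.map_cons, List.mem_cons, not_or] at h
    cases hba : (k == a.1) with
    | true => exact absurd (by simpa [beq_iff_eq] using hba) h.1
    | false => simp only [List.lookup, hba]; exact ih h.2

theorem pv_lookup_ne_none_of_mem {β : Type} (k : String) :
    ∀ (l : List (String × β)), k ∈ l.map Prod.fst → l.lookup k ≠ none := by
  intro l
  induction l with
  | nil => intro h; simp at h
  | cons a rest ih =>
    intro h
    cases hba : (k == a.1) with
    | true => simp [List.lookup, hba]
    | false =>
      have hne : k ≠ a.1 := by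
        intro he; rw [he] at hba; simp at hba
      have hk : k ∈ rest.map Prod.fst := by
        simp only [List.map_cons, List.mem_cons] at h
        tauto
      simp only [List.lookup, hba]
      exact ih hk

theorem pv_get?_foldl_round (R : PySem.Set String) (T : PySem.Dict String Int) :
    ∀ (items : List (String × List (String × String))),
      (items.map Prod.fst).Nodup →
      ∀ (T0 : PySem.Dict String Int) (k : String),
        (items.foldl (fun t kv => if R.contains kv.1 then t.insert kv.1 (pvRowB T kv.2) else t) T0).get? k
        = match items.lookup k with
          | some v => if R.contains k then some (pvRowB T v) else T0.get? k
          | none => T0.get? k := by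
  intro items
  induction items with
  | nil => intro _ T0 k; rfl
  | cons kv rest ih =>
    intro hnd T0 k
    obtain ⟨a, v⟩ := kv
    simp only [List.map_cons, List.nodup_cons] at hnd
    simp only [List.foldl_cons]
    rw [ih hnd.2]
    by_cases hk : k = a
    · subst hk
      rw [pv_lookup_eq_none_of_not_mem k rest hnd.1]
      have hlk : ((k, v) :: rest).lookup k = some v := by simp [List.lookup]
      rw [hlk]
      by_cases hm : k ∈ R
      · simp [hm, PySem.Dict.get?_insert_self]
      · simp [hm]
    · have hlk : ((a, v) :: rest).lookup k = rest.lookup k := by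
        simp [List.lookup, show (k == a) = false by simpa [beq_iff_eq] using hk]
      rw [hlk]
      have hT0 : (if R.contains a = true then T0.insert a (pvRowB T v) else T0).get? k = T0.get? k := by
        by_cases hm : a ∈ R
        · simp [hm, PySem.Dict.get?_insert, hk]
        · simp [hm]
      cases rest.lookup k with
      | none => exact hT0
      | some w => simp only []; rw [hT0]

theorem pv_mem_of_lookup {β : Type} (k : String) :
    ∀ (l : List (String × β)) (v : β), l.lookup k = some v → (k, v) ∈ l := by
  intro l
  induction l with
  | nil => intro v h; simp [List.lookup] at h
  | cons a rest ih =>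
    intro v h
    cases hba : (k == a.1) with
    | true =>
      rw [List.lookup, hba] at h
      have : a = (k, v) := by
        have h1 : k = a.1 := by simpa [beq_iff_eq] using hba
        cases a; cases h; simp_all
      simp [this]
    | false =>
      rw [List.lookup, hba] at h
      exact List.mem_cons_of_mem _ (ih v h)

theorem pv_dict_lookup (d : PySem.Dict String (List (String × String))) (k : String)
    (hnd : d.keys.Nodup) : d.get? k = d.items.lookup k := by
  cases h : d.items.lookup k with
  | some v => exact PySem.Dict.get?_of_mem_items d (pv_mem_of_lookup k d.items v h) hnd
  | none =>
    rw [PySem.Dict.get?_eq_none_iff_not_mem_keys]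
    intro hk
    exact pv_lookup_ne_none_of_mem k d.items (by simpa [PySem.Dict.keys] using hk) h

theorem pv_round_get? (d : PySem.Dict String (List (String × String))) (hnd : d.keys.Nodup)
    (R : PySem.Set String) (T : PySem.Dict String Int) (k : String) :
    (pvRoundB d R T).get? k
    = match d.get? k with
      | some v => if R.contains k then some (pvRowB T v) else none
      | none => none := by
  unfold pvRoundB
  rw [pv_get?_foldl_round R T d.items (by simpa [PySem.Dict.keys] using hnd) PySem.Dict.empty k,
      ← pv_dict_lookup d k hnd]
  cases d.get? k with
  | none => simp
  | some v => by_cases hc : R.contains k <;> simp_all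

theorem pv_round_getD (d : PySem.Dict String (List (String × String))) (hnd : d.keys.Nodup)
    (R : PySem.Set String) (T : PySem.Dict String Int) (k : String) :
    (pvRoundB d R T).getD k 0
    = match d.get? k with
      | some v => if R.contains k then pvRowB T v else 0
      | none => 0 := by
  rw [PySem.Dict.getD_eq_get?_getD, pv_round_get? d hnd R T k]
  cases d.get? k with
  | none => simp
  | some v => by_cases hc : R.contains k <;> simp_all

-- ----- table loop: early-exit form agrees pointwise with the breakless form -----
-- rows only read the previous table through getD, so a round is getD-extensional
theorem pv_rowB_congr (X Y : PySem.Dict String Int)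
    (h : ∀ k, X.getD k 0 = Y.getD k 0) :
    ∀ contents, pvRowB X contents = pvRowB Y contents := by
  intro contents
  induction contents with
  | nil => rfl
  | cons pr rest ih =>
    obtain ⟨name, qty⟩ := pr
    simp only [pvRowB, ih, h name]

theorem pv_round_congr (d : PySem.Dict String (List (String × String))) (R : PySem.Set String)
    (X Y : PySem.Dict String Int) (h : ∀ k, X.getD k 0 = Y.getD k 0) :
    pvRoundB d R X = pvRoundB d R Y := by
  unfold pvRoundB
  have hf : (fun (t : PySem.Dict String Int) (kv : String × List (String × String)) =>
      if R.contains kv.1 then t.insert kv.1 (pvRowB X kv.2) else t)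
      = (fun t kv => if R.contains kv.1 then t.insert kv.1 (pvRowB Y kv.2) else t) := by
    funext t kv
    rw [pv_rowB_congr X Y h kv.2]
  rw [hf]

-- zero outside the rebuilt keys: satisfied by the empty table and by every round's result
def pvZeroOut (d : PySem.Dict String (List (String × String))) (R : PySem.Set String)
    (T : PySem.Dict String Int) : Prop :=
  ∀ k, (d.get? k = none ∨ R.contains k = false) → T.getD k 0 = 0

theorem pv_zeroOut_empty (d : PySem.Dict String (List (String × String))) (R : PySem.Set String) :
    pvZeroOut d R PySem.Dict.empty := by
  intro k _; simp

theorem pv_zeroOut_round (d : PySem.Dict String (List (String × String))) (hnd : d.keys.Nodup)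
    (R : PySem.Set String) (T : PySem.Dict String Int) : pvZeroOut d R (pvRoundB d R T) := by
  intro k hk
  rw [pv_round_getD d hnd R T k]
  rcases hk with h | h
  · simp [h]
  · cases hg : d.get? k with
    | none => simp
    | some v =>
      have hm : ¬ k ∈ R := fun hh => by
        rw [(PySem.Set.contains_iff R k).mpr hh] at h; exact Bool.noConfusion h
      simp [hm]

-- if a round changes no entry of the previous table, the tables agree pointwise
theorem pv_round_stable_getD (d : PySem.Dict String (List (String × String))) (hnd : d.keys.Nodup)
    (R : PySem.Set String) (T : PySem.Dict String Int) (hZ : pvZeroOut d R T)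
    (hall : (pvRoundB d R T).items.all (fun kv => T.getD kv.1 0 == kv.2) = true) :
    ∀ k, (pvRoundB d R T).getD k 0 = T.getD k 0 := by
  intro k
  cases hg : d.get? k with
  | none =>
    rw [pv_round_getD d hnd R T k, hg]
    exact (hZ k (Or.inl hg)).symm
  | some v =>
    by_cases hc : R.contains k = true
    · have hm : k ∈ R := (PySem.Set.contains_iff R k).mp hc
      have hget : (pvRoundB d R T).get? k = some (pvRowB T v) := by
        rw [pv_round_get? d hnd R T k, hg]
        simp [hm]
      have hmem : (k, pvRowB T v) ∈ (pvRoundB d R T).items :=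
        PySem.Dict.mem_items_of_get?_eq_some (pvRoundB d R T) hget
      have := (List.all_eq_true.mp hall) _ hmem
      have heq : T.getD k 0 = pvRowB T v := by simpa using this
      rw [pv_round_getD d hnd R T k, hg]
      simp [hm, heq]
    · have hc' : R.contains k = false := by simpa using hc
      have hm : ¬ k ∈ R := fun hh => by
        rw [(PySem.Set.contains_iff R k).mpr hh] at hc'; exact Bool.noConfusion hc'
      rw [pv_round_getD d hnd R T k, hg]
      simp [hm, hZ k (Or.inr hc')]

theorem pv_tablePlain_stable (d : PySem.Dict String (List (String × String)))
    (R : PySem.Set String) (X : PySem.Dict String Int) (h : pvRoundB d R X = X) :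
    ∀ j, pvTablePlain d R j X = X := by
  intro j
  induction j with
  | zero => rfl
  | succ j ih => rw [pvTablePlain, h, ih]

theorem pv_tableEarly_getD (d : PySem.Dict String (List (String × String))) (hnd : d.keys.Nodup)
    (R : PySem.Set String) :
    ∀ (j : Nat) (T : PySem.Dict String Int), pvZeroOut d R T →
      ∀ k, (pvTableIterB d R j T).getD k 0 = (pvTablePlain d R j T).getD k 0 := by
  intro j
  induction j with
  | zero => intro T _ k; rfl
  | succ j ih =>
    intro T hZ k
    rw [pvTableIterB, pvTablePlain]
    by_cases hall : (pvRoundB d R T).items.all (fun kv => T.getD kv.1 0 == kv.2) = true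
    · rw [if_pos hall]
      have hpt : ∀ k', (pvRoundB d R T).getD k' 0 = T.getD k' 0 :=
        pv_round_stable_getD d hnd R T hZ hall
      have hfix : pvRoundB d R (pvRoundB d R T) = pvRoundB d R T := by
        rw [pv_round_congr d R (pvRoundB d R T) T hpt]
      rw [pv_tablePlain_stable d R (pvRoundB d R T) hfix j]
    · rw [if_neg hall]
      exact ih (pvRoundB d R T) (pv_zeroOut_round d hnd R T) k

-- ----- the table computes pvUnitF on the reachable sub-graph -----
theorem pv_rowB_eq_unitL (d : PySem.Dict String (List (String × String)))
    (T : PySem.Dict String Int) (f : Nat) :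
    ∀ (contents : List (String × String)),
      (∀ name ∈ pvChildrenB contents, T.getD name 0 = pvUnitF d f name) →
      pvRowB T contents = pvUnitL d f contents := by
  intro contents
  induction contents with
  | nil => intro _; simp [pvRowB, pvUnitL]
  | cons pr rest ih =>
    intro h
    obtain ⟨name, qty⟩ := pr
    by_cases hn : name == "other"
    · simp [pvRowB, pvUnitL, hn]
    · have hch : pvChildrenB ((name, qty) :: rest) = name :: pvChildrenB rest := by
        simp [pvChildrenB, List.takeWhile, hn]
      rw [hch] at h
      simp only [pvRowB, pvUnitL, hn, Bool.false_eq_true, if_false]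
      rw [h name (by simp), ih (fun x hx => h x (by simp [hx]))]

theorem pv_tablePlain_succ' (d : PySem.Dict String (List (String × String))) (R : PySem.Set String) :
    ∀ (j : Nat) (T : PySem.Dict String Int),
      pvTablePlain d R (j+1) T = pvRoundB d R (pvTablePlain d R j T) := by
  intro j
  induction j with
  | zero => intro T; rfl
  | succ j ih => intro T; rw [pvTablePlain, ih]; rfl

theorem pv_table_correct (d : PySem.Dict String (List (String × String))) (hnd : d.keys.Nodup)
    (S0 : PySem.Set String) (N : Nat) :
    ∀ (j m : Nat) (k : String), m + j ≤ N → k ∈ pvReachPlain d m S0 →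
      (pvTablePlain d (pvReachPlain d N S0) j PySem.Dict.empty).getD k 0 = pvUnitF d j k := by
  intro j
  induction j with
  | zero => intro m k _ _; simp [pvTablePlain, pvUnitF]
  | succ j ih =>
    intro m k hle hk
    rw [pv_tablePlain_succ', pv_round_getD d hnd]
    have hkN : k ∈ pvReachPlain d N S0 :=
      pv_mem_reach_le d S0 (by omega) k hk
    have hcon : (pvReachPlain d N S0).contains k = true := by
      simpa [PySem.Set.contains_iff] using hkN
    cases hg : d.get? k with
    | none => simp [pvUnitF, hg]
    | some v =>
      simp only [hcon, if_pos]
      have hchild : ∀ name ∈ pvChildrenB v,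
          (pvTablePlain d (pvReachPlain d N S0) j PySem.Dict.empty).getD name 0 = pvUnitF d j name := by
        intro name hname
        have hmem : name ∈ pvReachPlain d (m+1) S0 := by
          rw [pv_reachPlain_succ']
          exact pv_mem_child_reachStep d _ k name hk (by simpa [hg] using hname)
        exact ih (m+1) name (by omega) hmem
      rw [pv_rowB_eq_unitL d _ j v hchild]
      simp [pvUnitF, hg]

-- B's table entry at starting_point equals the fuel-(n+1) unit count
theorem pv_alt_table (relationships : List (String × List (String × String))) (starting_point : String) :
    (pvTableIterB (PySem.Dict.ofList relationships)
        (pvReachIterB (PySem.Dict.ofList relationships) ((PySem.Dict.ofList relationships).size + 1) (PySem.Set.ofList [starting_point]))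
        ((PySem.Dict.ofList relationships).size + 1) PySem.Dict.empty).getD starting_point 0
    = pvUnitF (PySem.Dict.ofList relationships) ((PySem.Dict.ofList relationships).size + 1) starting_point := by
  set d := PySem.Dict.ofList relationships with hd
  have hnd : d.keys.Nodup := PySem.Dict.nodup_keys_ofList relationships
  have hstart : starting_point ∈ pvReachPlain d 0 (PySem.Set.ofList [starting_point]) := by
    simp [pvReachPlain, PySem.Set.mem_ofList]
  rw [pv_reachEarly_eq_plain d _ _,
      pv_tableEarly_getD d hnd (pvReachPlain d (d.size + 1) (PySem.Set.ofList [starting_point]))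
        (d.size + 1) PySem.Dict.empty (pv_zeroOut_empty d _) starting_point]
  exact pv_table_correct d hnd _ (d.size + 1) (d.size + 1) 0 starting_point (by omega) hstart

-- Dict.ofList is foldl-insert, whose lookup is the last matching pair
theorem pv_foldl_insert_get? (k : String) :
    ∀ (ps : List (String × List (String × String))) (d : PySem.Dict String (List (String × String))),
      (ps.foldl (fun d kv => d.insert kv.1 kv.2) d).get? k
      = ps.foldl (fun acc kv => if kv.1 == k then some kv.2 else acc) (d.get? k) := by
  intro ps
  induction ps with
  | nil => intro d; rfl
  | cons a rest ih =>
    intro d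
    simp only [List.foldl_cons]
    rw [ih]
    congr 1
    rw [PySem.Dict.get?_insert]
    by_cases h : k = a.1
    · simp [h]
    · have hb : (a.1 == k) = false := by
        simp only [beq_eq_false_iff_ne, ne_eq]
        exact fun he => h he.symm
      simp [h, hb]

theorem pv_ofList_get?_eq_lastLookup (relationships : List (String × List (String × String))) (k : String) :
    (PySem.Dict.ofList relationships).get? k = pvLastLookup relationships k := by
  show ((relationships.foldl (fun d kv => d.insert kv.1 kv.2) PySem.Dict.empty)).get? k = _
  rw [pv_foldl_insert_get?]
  rfl

theorem pv_main (relationships : List (String × List (String × String))) (starting_point : String)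
    (previous : Int) (answer_list : List Int)
    (hD : ¬ D_walk_relationship_with_counts relationships starting_point previous answer_list) :
    walk_relationship_with_counts relationships starting_point previous answer_list
    = walk_relationship_with_counts_alt relationships starting_point previous answer_list := by
  unfold walk_relationship_with_counts walk_relationship_with_counts_alt
  have htab := pv_alt_table relationships starting_point
  unfold D_walk_relationship_with_counts at hD
  rw [← pv_ofList_get?_eq_lastLookup relationships starting_point] at hD
  set d := PySem.Dict.ofList relationships with hd
  cases h : d.get? starting_point with
  | none =>
    simp only [h]
    have : pvUnitF d (d.size + 1) starting_point = 0 := by simp [pvUnitF, h]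
    simp [htab, this]
  | some paths =>
    simp only [h]
    rw [h] at hD
    have ho' : paths.any (fun pr => pr.1 == "other") = false := by
      cases hx : paths.any (fun pr => pr.1 == "other") with
      | true => exact absurd (by simpa using hx) hD
      | false => rfl
    have hu : pvUnitF d (d.size + 1) starting_point = pvUnitL d d.size paths := by
      simp [pvUnitF, h]
    simp [pv_topA_of_no_other d paths previous answer_list ho', htab, hu]

theorem pv_tight (relationships : List (String × List (String × String))) (starting_point : String)
    (previous : Int) (answer_list : List Int)
    (hD : D_walk_relationship_with_counts relationships starting_point previous answer_list) :
    walk_relationship_with_counts relationships starting_point previous answer_list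
    ≠ walk_relationship_with_counts_alt relationships starting_point previous answer_list := by
  unfold walk_relationship_with_counts walk_relationship_with_counts_alt
  unfold D_walk_relationship_with_counts at hD
  rw [← pv_ofList_get?_eq_lastLookup relationships starting_point] at hD
  set d := PySem.Dict.ofList relationships with hd
  cases h : d.get? starting_point with
  | none => rw [h] at hD; exact absurd hD (by simp)
  | some paths =>
    rw [h] at hD
    simp only [h]
    rw [pv_topA_of_other d paths previous answer_list (by simpa using hD)]
    simp

-- ===== VERDICT (by name: the statements are the Claim_ definitions above) =====
theorem walk_relationship_with_counts_spec : Claim_unchanged_walk_relationship_with_counts := by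
  intro relationships starting_point previous answer_list _ _
  unfold Spec_walk_relationship_with_counts
  exact pv_main relationships starting_point previous answer_list

theorem walk_relationship_with_counts_changed : Claim_changed_walk_relationship_with_counts := by
  unfold Claim_changed_walk_relationship_with_counts; decide

theorem walk_relationship_with_counts_tight : Claim_exact_walk_relationship_with_counts := by
  intro relationships starting_point previous answer_list _ _ hD
  exact pv_tight relationships starting_point previous answer_list hD
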